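-- pv_equiv track=rewrite | github.com/cybershaman666/jobshaman.cz | Pokus/job_agent/profile.py | _extract_items
-- ===== SOURCE A (Python) =====
-- def _extract_items(lines: list[str], header_name: str) -> list[str]:
--     values: list[str] = []
--     active = False
--     header_label = header_name.lower().replace("_", " ")
--     for line in lines:
--         lower = line.lower().rstrip(":")
--         if lower == header_label:
--             active = True
--             continue
--         if active and line.endswith(":"):
--             break
--         if active:
--             values.append(line)
--     return values
-- ===== SOURCE B (Python) =====
-- def _extract_items(lines: list[str], header_name: str) -> list[str]:
--     label = header_name.lower().replace("_", " ")
--     matches = [line.lower().rstrip(":") == label for line in lines]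
--     if True not in matches:
--         return []
--     start = matches.index(True) + 1
--     stop = next((k for k in range(start, len(lines))
--                  if not matches[k] and lines[k].endswith(":")), len(lines))
--     return [line for k, line in enumerate(lines[start:stop], start) if not matches[k]]
-- ===== Notes on version B (the rewrite author's own statement) =====
-- stated objective: alternative
-- what changed: Replaces A's single stateful flagged scan with an index/slice formulation: precompute a boolean header-match mask over all lines, locate the section start with .index(True), compute the stop index of the next section header over the mask, and return a filtered slice lines[start:stop] — no flag and no break, the loop disappears into mask + index arithmetic + comprehension.
import Mathlib
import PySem

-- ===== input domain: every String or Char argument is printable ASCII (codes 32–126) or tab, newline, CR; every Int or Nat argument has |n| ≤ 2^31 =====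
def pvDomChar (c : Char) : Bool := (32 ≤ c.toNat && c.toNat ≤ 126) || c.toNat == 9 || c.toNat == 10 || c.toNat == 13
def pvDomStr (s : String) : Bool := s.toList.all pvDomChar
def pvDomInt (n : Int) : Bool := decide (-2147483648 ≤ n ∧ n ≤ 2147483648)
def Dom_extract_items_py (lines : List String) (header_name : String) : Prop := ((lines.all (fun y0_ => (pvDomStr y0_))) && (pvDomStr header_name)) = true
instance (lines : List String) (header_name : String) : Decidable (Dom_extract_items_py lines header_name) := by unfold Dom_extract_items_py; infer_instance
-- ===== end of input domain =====

-- B replaces A's flagged scan with a mask + start/stop indices + filtered slice; same cost, different decomposition.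

-- ===== PORT A =====
-- line.lower().rstrip(":") — rstrip(":") removes all trailing ':' characters (exact hand port; PySem has no rstrip-with-chars)
def pvRstripColon (s : String) : String := String.ofList ((s.toList.reverse.dropWhile (· == ':')).reverse)

-- the 'for line in lines' loop of A, with its 'active' flag and the break returning what was collected so far
def pvLoopA (label : String) (active : Bool) : List String → List String
  | [] => []
  | l :: ls =>
    if pvRstripColon (PySem.Str.lower l) == label then pvLoopA label true ls
    else if active && PySem.Str.endswith l ":" then []
    else if active then l :: pvLoopA label active ls
    else pvLoopA label active ls

def extract_items_py (lines : List String) (header_name : String) : List String :=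
  pvLoopA (PySem.Str.replace (PySem.Str.lower header_name) "_" " ") false lines

-- ===== PORT B =====
-- matches = [line.lower().rstrip(":") == label for line in lines]
def pvMask (label : String) (lines : List String) : List Bool :=
  lines.map (fun l => pvRstripColon (PySem.Str.lower l) == label)

-- matches.index(True), with the 'True not in matches' guard folded in as none
def pvIndexTrue : List Bool → Option Nat
  | [] => none
  | b :: bs => if b then some 0 else (pvIndexTrue bs).map (· + 1)

-- offset (from start) of the first later line with not matches[k] and lines[k].endswith(":"); length if none
def pvStopOff : List Bool → List String → Nat
  | m :: ms, l :: ls => if !m && PySem.Str.endswith l ":" then 0 else 1 + pvStopOff ms ls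
  | _, _ => 0

def extract_items_py_alt (lines : List String) (header_name : String) : List String :=
  let label := PySem.Str.replace (PySem.Str.lower header_name) "_" " "
  let ms := pvMask label lines
  match pvIndexTrue ms with
  | none => []
  | some i =>
    let ms' := ms.drop (i + 1)
    let ls' := lines.drop (i + 1)
    (((ms'.zip ls').take (pvStopOff ms' ls')).filterMap
      (fun p => if p.1 then none else some p.2))

-- ===== PRECONDITION & SPEC =====
def Spec_extract_items_py (lines : List String) (header_name : String) (out : List String) : Prop := out = extract_items_py_alt lines header_name
instance (lines : List String) (header_name : String) (out : List String) : Decidable (Spec_extract_items_py lines header_name out) := by unfold Spec_extract_items_py; infer_instance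

-- ===== CLAIM (what is proved, stated in full; the proofs are below) =====
def Claim_equal_extract_items_py : Prop := ∀ (lines : List String) (header_name : String), Dom_extract_items_py lines header_name → Spec_extract_items_py lines header_name (extract_items_py lines header_name)

-- ===== LEMMAS AND PROOFS =====
theorem pvTakeOneAdd {α : Type} (n : Nat) (x : α) (xs : List α) :
    List.take (1 + n) (x :: xs) = x :: List.take n xs := by
  rw [Nat.add_comm]; simp

-- once active, A's loop is exactly B's filtered slice of the remaining lines
theorem pvLoopA_active (label : String) (ls : List String) :
    pvLoopA label true ls =
      (((pvMask label ls).zip ls).take (pvStopOff (pvMask label ls) ls)).filterMap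
        (fun p => if p.1 then none else some p.2) := by
  induction ls with
  | nil => rfl
  | cons l ls ih =>
    by_cases hm : (pvRstripColon (PySem.Str.lower l) == label) = true
    · simp [pvLoopA, pvMask, pvStopOff, hm, ih, pvTakeOneAdd]
    · by_cases he : PySem.Str.endswith l ":" = true
      · simp [pvLoopA, pvMask, pvStopOff, PySem.Str.endswith, hm,
          PySem.Str.endswith] at he ⊢
        simp [he]
      · simp [pvLoopA, pvMask, pvStopOff, PySem.Str.endswith, hm] at he ⊢
        simp [he, ih, pvTakeOneAdd, pvMask]

-- before the header is met, A's loop is B's whole body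
theorem pvLoopA_inactive (label : String) (ls : List String) :
    pvLoopA label false ls =
      (match pvIndexTrue (pvMask label ls) with
       | none => []
       | some i =>
         (((pvMask label ls).drop (i + 1)).zip (ls.drop (i + 1))).take
             (pvStopOff ((pvMask label ls).drop (i + 1)) (ls.drop (i + 1)))
           |>.filterMap (fun p => if p.1 then none else some p.2)) := by
  induction ls with
  | nil => rfl
  | cons l ls ih =>
    by_cases hm : (pvRstripColon (PySem.Str.lower l) == label) = true
    · simp [pvLoopA, pvMask, pvIndexTrue, hm, pvLoopA_active]
    · simp only [pvLoopA, pvMask, pvIndexTrue, hm, Bool.false_and,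
        List.map_cons, Option.map]
      rw [ih]
      cases hfind : pvIndexTrue (pvMask label ls) with
      | none => simp [pvMask] at hfind ⊢; simp [hfind]
      | some i => simp [pvMask] at hfind ⊢; simp [hfind]

-- ===== VERDICT (by name: the statement is the Claim_ definition above) =====
theorem extract_items_py_spec : Claim_equal_extract_items_py := by
  intro lines header_name _
  unfold Spec_extract_items_py extract_items_py extract_items_py_alt
  exact pvLoopA_inactive _ _
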